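-- pv_equiv track=rewrite | github.com/databrickslabs/dbldatagen | tests/test_build_planning.py | builtBefore
-- ===== SOURCE A (Python) =====
-- def builtBefore(field1, field2, build_order):
--     """ check if field1 is built before field2"""
--
--     fieldsBuilt = []
--
--     for phase in build_order:
--         for el in phase:
--             if el == field1:
--                 return field2 in fieldsBuilt
--             fieldsBuilt.append(el)
--
--     return False
-- ===== SOURCE B (Python) =====
-- def builtBefore(field1, field2, build_order):
--     """ check if field1 is built before field2"""
--     flat = []
--     for phase in build_order:
--         flat.extend(phase)
--     if field1 not in flat:
--         return False
--     i1 = flat.index(field1)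
--     return field2 in flat[:i1]
-- ===== Notes on version B (the rewrite author's own statement) =====
-- stated objective: alternative
-- what changed: B materialises the whole build order into one flat list and answers by positions (first index of field1, membership in the prefix before it) instead of A's streaming nested loops with an early return and a growing accumulator list.
import Mathlib
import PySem

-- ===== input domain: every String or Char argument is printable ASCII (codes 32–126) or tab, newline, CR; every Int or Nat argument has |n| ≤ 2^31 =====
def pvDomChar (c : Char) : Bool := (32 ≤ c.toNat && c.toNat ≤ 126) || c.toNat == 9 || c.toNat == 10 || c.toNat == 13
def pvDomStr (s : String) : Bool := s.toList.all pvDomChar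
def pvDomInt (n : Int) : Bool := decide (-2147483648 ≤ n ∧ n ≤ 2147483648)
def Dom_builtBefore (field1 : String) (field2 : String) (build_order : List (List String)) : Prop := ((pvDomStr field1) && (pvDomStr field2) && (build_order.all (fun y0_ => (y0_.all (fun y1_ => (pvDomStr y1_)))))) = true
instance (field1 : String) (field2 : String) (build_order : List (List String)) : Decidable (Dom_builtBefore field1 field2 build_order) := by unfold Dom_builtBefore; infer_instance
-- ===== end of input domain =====

-- B flattens the build order and answers by position (first index of field1, membership in the
-- prefix before it) instead of A's streaming nested loops with early return; objective: alternative.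

-- ===== PORT A =====
-- inner loop: 'for el in phase' with accumulator fieldsBuilt; some b = early return
def builtBeforeInner (field1 field2 : String) (acc : List String) : List String → Option Bool × List String
  | [] => (none, acc)
  | el :: rest =>
    if el = field1 then (some (decide (field2 ∈ acc)), acc)
    else builtBeforeInner field1 field2 (acc ++ [el]) rest

-- outer loop: 'for phase in build_order'
def builtBeforeOuter (field1 field2 : String) (acc : List String) : List (List String) → Bool
  | [] => false
  | phase :: rest =>
    match builtBeforeInner field1 field2 acc phase with
    | (some b, _) => b
    | (none, acc') => builtBeforeOuter field1 field2 acc' rest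

def builtBefore (field1 : String) (field2 : String) (build_order : List (List String)) : Bool :=
  builtBeforeOuter field1 field2 [] build_order

-- ===== PORT B =====
def builtBefore_alt (field1 : String) (field2 : String) (build_order : List (List String)) : Bool :=
  let flat := build_order.foldl (fun acc phase => acc ++ phase) []
  match PySem.List.index? flat field1 with
  | none => false
  | some i1 => decide (field2 ∈ PySem.List.slice flat none (some (i1 : Int)))

-- ===== PRECONDITION & SPEC =====
def Spec_builtBefore (field1 : String) (field2 : String) (build_order : List (List String)) (out : Bool) : Prop := out = builtBefore_alt field1 field2 build_order
instance (field1 : String) (field2 : String) (build_order : List (List String)) (out : Bool) : Decidable (Spec_builtBefore field1 field2 build_order out) := by unfold Spec_builtBefore; infer_instance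

-- ===== CLAIM (what is proved, stated in full; the proofs are below) =====
def Claim_equal_builtBefore : Prop := ∀ (field1 : String) (field2 : String) (build_order : List (List String)), Dom_builtBefore field1 field2 build_order → Spec_builtBefore field1 field2 build_order (builtBefore field1 field2 build_order)

-- ===== LEMMAS AND PROOFS =====

theorem inner_append (f1 f2 : String) (acc xs ys : List String) :
    builtBeforeInner f1 f2 acc (xs ++ ys) =
      match builtBeforeInner f1 f2 acc xs with
      | (some b, a) => (some b, a)
      | (none, a) => builtBeforeInner f1 f2 a ys := by
  induction xs generalizing acc with
  | nil => simp [builtBeforeInner]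
  | cons el rest ih =>
    by_cases h : el = f1 <;> simp [builtBeforeInner, h, ih]

theorem inner_char (f1 f2 : String) (acc xs : List String) :
    builtBeforeInner f1 f2 acc xs =
      match PySem.List.index? xs f1 with
      | none => (none, acc ++ xs)
      | some i => (some (decide (f2 ∈ acc ++ xs.take i)), acc ++ xs.take i) := by
  induction xs generalizing acc with
  | nil => simp [builtBeforeInner, PySem.List.index?]
  | cons el rest ih =>
    by_cases h : el = f1
    · subst h
      rw [PySem.List.index?_cons_self]
      simp [builtBeforeInner]
    · rw [PySem.List.index?_cons_of_ne _ (by simpa using h)]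
      simp only [builtBeforeInner, if_neg h, ih]
      cases hidx : PySem.List.index? rest f1 with
      | none => simp
      | some i => simp [List.take_succ_cons]

theorem outer_flatten (f1 f2 : String) (acc : List String) (phases : List (List String)) :
    builtBeforeOuter f1 f2 acc phases =
      match builtBeforeInner f1 f2 acc phases.flatten with
      | (some b, _) => b
      | (none, _) => false := by
  induction phases generalizing acc with
  | nil => simp [builtBeforeOuter, builtBeforeInner]
  | cons phase rest ih =>
    simp only [builtBeforeOuter, List.flatten_cons, inner_append]
    cases hi : builtBeforeInner f1 f2 acc phase with
    | mk ob a =>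
      cases ob with
      | some b => simp
      | none => simp [ih]

theorem builtBefore_spec : Claim_equal_builtBefore := by
  intro f1 f2 bo _
  unfold Spec_builtBefore builtBefore builtBefore_alt
  rw [PySem.List.foldl_append_eq_flatten]
  simp only [List.nil_append]
  rw [outer_flatten, inner_char]
  cases hidx : PySem.List.index? bo.flatten f1 with
  | none => simp
  | some i =>
    simp only [List.nil_append]
    simp [PySem.List.slice_to_natCast]
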